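-- pv_equiv track=rewrite | github.com/nytud/HunTag3 | features.py | capsPattern
-- ===== SOURCE A (Python) =====
-- def hasCapOperator(form):
--     """Has it capital letter anywhere?
--
--     Args:
--        form (str): The token
--
--     Returns:
--        [Bool in int format]: True if lowercasing modifies the token
--
--     HunTag:
--         Type: Token
--         Field: Token
--         Example: 'aLma' -> [1], 'alma' -> [0]
--         Use case: NER
--
--     Replaces:
--         token_isCapitalizedOperator: deprecated
--         token_lowerCaseOperator: inverse, redundant
--     """
--     return [int(form.lower() != form)]
--
-- def capsPattern(sen, fields):
--     """Capitalized word sequence patterns"""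
--     featVec = [[] for _ in sen]
--
--     assert len(fields) == 1
--     tokens = [word[fields[0]] for word in sen]
--     upperFlags = [hasCapOperator(token)[0] for token in tokens]
--     start = -1
--     mapStartToSize = {}
--     for pos, flag in enumerate(upperFlags + [0]):
--         if flag == 0:
--             if start != -1:
--                 mapStartToSize[start] = pos - start
--             start = -1
--             continue
--         else:
--             if start == -1:
--                 start = pos
--         if start != -1:
--             mapStartToSize[start] = len(upperFlags) - start
--
--     for pos, flag in enumerate(upperFlags):
--         if flag == 0:
--             start = -1
--             continue
--         if start == -1:
--             start = pos
--         positionInsideCapSeq = pos - start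
--         lengthOfCapSeq = mapStartToSize[start]
--         p = str(positionInsideCapSeq)
--         l = str(lengthOfCapSeq)
--         featVec[pos] += ['p{0}'.format(p),
--                          'l{0}'.format(l),
--                          'p{0}l{1}'.format(p, l)]
--
--     return featVec
-- ===== SOURCE B (Python) =====
-- def capsPattern(sen, fields):
--     """Capitalized word sequence patterns (single run-scan, no start->size dict)"""
--     assert len(fields) == 1
--     tokens = [word[fields[0]] for word in sen]
--     flags = [t.lower() != t for t in tokens]
--     featVec = []
--     i, n = 0, len(flags)
--     while i < n:
--         if not flags[i]:
--             featVec.append([])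
--             i += 1
--             continue
--         j = i
--         while j < n and flags[j]:
--             j += 1
--         length = j - i
--         for k in range(length):
--             featVec.append(['p%d' % k, 'l%d' % length, 'p%dl%d' % (k, length)])
--         i = j
--     return featVec
-- ===== Notes on version B (the rewrite author's own statement) =====
-- stated objective: simpler
-- what changed: Replaced A's two enumerate passes and the mapStartToSize dict with one run-scan that, per maximal capitalized run, emits the position/length feature lists directly while building the output front-to-back.
import Mathlib
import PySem

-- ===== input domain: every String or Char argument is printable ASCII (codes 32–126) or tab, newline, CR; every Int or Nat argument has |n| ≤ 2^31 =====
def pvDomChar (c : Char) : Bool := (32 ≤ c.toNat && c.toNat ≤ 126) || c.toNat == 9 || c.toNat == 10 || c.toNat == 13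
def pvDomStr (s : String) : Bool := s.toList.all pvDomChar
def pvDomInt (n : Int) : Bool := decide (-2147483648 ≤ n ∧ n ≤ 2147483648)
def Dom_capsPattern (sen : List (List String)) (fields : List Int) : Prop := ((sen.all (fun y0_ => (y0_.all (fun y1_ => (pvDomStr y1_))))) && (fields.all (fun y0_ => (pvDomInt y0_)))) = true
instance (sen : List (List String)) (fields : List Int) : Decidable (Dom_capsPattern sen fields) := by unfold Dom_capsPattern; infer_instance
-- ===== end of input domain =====

-- B replaces A's two enumerate passes and the mapStartToSize dict with a single run-scan
-- that emits each capitalized run's feature lists directly (objective: simpler).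


-- ===== PORT A =====
-- return [int(form.lower() != form)]
def hasCapOperator (form : String) : List Int :=
  [if PySem.Str.lower form ≠ form then 1 else 0]

-- first pass: 'for pos, flag in enumerate(upperFlags + [0])' with loop state (pos, start, mapStartToSize)
def pvLoop1 (n : Int) : Nat → Int → PySem.Dict Int Int → List Int → Int × PySem.Dict Int Int
  | _, start, m, [] => (start, m)
  | pos, start, m, flag :: rest =>
    if flag == 0 then
      pvLoop1 n (pos + 1) (-1) (if start != -1 then m.insert start ((pos : Int) - start) else m) rest
    else
      let start' := if start == -1 then (pos : Int) else start
      pvLoop1 n (pos + 1) start'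
        (if start' != -1 then m.insert start' (n - start') else m) rest

-- second pass: 'for pos, flag in enumerate(upperFlags)' updating featVec[pos] in place
-- (mapStartToSize[start]: the key is always present, so getD with default 0 is exact)
def pvLoop2 (m : PySem.Dict Int Int) : Nat → Int → List (List String) → List Int → List (List String)
  | _, _, fv, [] => fv
  | pos, start, fv, flag :: rest =>
    if flag == 0 then
      pvLoop2 m (pos + 1) (-1) fv rest
    else
      let start' := if start == -1 then (pos : Int) else start
      let p := PySem.Int.toStr ((pos : Int) - start')
      let l := PySem.Int.toStr (m.getD start' 0)
      pvLoop2 m (pos + 1) start'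
        (fv.set pos ((fv.getD pos []) ++ ["p" ++ p, "l" ++ l, "p" ++ p ++ "l" ++ l])) rest

def capsPattern (sen : List (List String)) (fields : List Int) : List (List String) :=
  let featVec := sen.map (fun _ => ([] : List String))
  -- assert len(fields) == 1 and word[fields[0]]: Pre_ excludes the AssertionError/IndexError inputs
  let tokens := sen.map (fun word => (PySem.List.pyGet? word ((PySem.List.pyGet? fields 0).getD 0)).getD "")
  let upperFlags := tokens.map (fun token => (PySem.List.pyGet? (hasCapOperator token) 0).getD 0)
  let r1 := pvLoop1 (upperFlags.length : Int) 0 (-1) PySem.Dict.empty (upperFlags ++ [0])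
  pvLoop2 r1.2 0 r1.1 featVec upperFlags

-- ===== PORT B =====
-- length of the leading capitalized run (the inner 'while j < n and flags[j]')
def pvRunLen : List Bool → Nat
  | [] => 0
  | f :: t => if f then pvRunLen t + 1 else 0

def pvFeats (k L : Int) : List String :=
  ["p" ++ PySem.Int.toStr k, "l" ++ PySem.Int.toStr L,
   "p" ++ PySem.Int.toStr k ++ "l" ++ PySem.Int.toStr L]

-- the outer while-loop over the suffix of flags starting at i
def pvEmit : List Bool → List (List String)
  | [] => []
  | f :: t =>
    if f then
      (List.range (pvRunLen t + 1)).map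
        (fun k => pvFeats (k : Int) ((pvRunLen t + 1 : Nat) : Int)) ++ pvEmit (t.drop (pvRunLen t))
    else [] :: pvEmit t
termination_by l => l.length
decreasing_by
  · simpa using Nat.lt_succ_of_le (List.length_drop (l := t) (i := pvRunLen t) ▸ Nat.sub_le _ _)
  · simp

def capsPattern_alt (sen : List (List String)) (fields : List Int) : List (List String) :=
  let tokens := sen.map (fun word => (PySem.List.pyGet? word ((PySem.List.pyGet? fields 0).getD 0)).getD "")
  pvEmit (tokens.map (fun t => PySem.Str.lower t != t))

-- ===== PRECONDITION & SPEC =====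
-- A raises AssertionError unless len(fields) == 1 and IndexError unless fields[0] is a
-- valid (possibly negative) index into every word; Pre_ admits exactly the other inputs.
def Pre_capsPattern (sen : List (List String)) (fields : List Int) : Prop :=
  fields.length = 1 ∧ ∀ w ∈ sen, PySem.Raise.InRange w.length (fields.getD 0 0)
instance (sen : List (List String)) (fields : List Int) : Decidable (Pre_capsPattern sen fields) := by
  unfold Pre_capsPattern; infer_instance

def pvWitness_capsPattern : List (List String) × List Int := ([["Abc"], ["de"], ["Fg"], ["Hi"]], [0])

def Spec_capsPattern (sen : List (List String)) (fields : List Int) (out : List (List String)) : Prop := out = capsPattern_alt sen fields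
instance (sen : List (List String)) (fields : List Int) (out : List (List String)) : Decidable (Spec_capsPattern sen fields out) := by unfold Spec_capsPattern; infer_instance

-- ===== CLAIM (what is proved, stated in full; the proofs are below) =====
def Claim_equal_capsPattern : Prop := ∀ (sen : List (List String)) (fields : List Int), Dom_capsPattern sen fields → Pre_capsPattern sen fields → Spec_capsPattern sen fields (capsPattern sen fields)

-- ===== LEMMAS AND PROOFS =====
def pvToInts (bs : List Bool) : List Int := bs.map (fun b => if b then 1 else 0)

-- the first pass always finishes with start = -1 (the appended sentinel 0 resets it)
theorem pvLoop1_fst (l : List Int) : ∀ n pos start m, (pvLoop1 n pos start m (l ++ [0])).1 = -1 := by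
  induction l with
  | nil => intro n pos start m; simp [pvLoop1]
  | cons f t ih =>
    intro n pos start m
    by_cases hf : f = 0 <;> simp [pvLoop1, hf, ih]

-- keys below pos (and below start) are never touched by the rest of the first pass
theorem pvLoop1_getD_lt (l : List Int) : ∀ (n : Int) (pos : Nat) (start : Int) m (s d : Int),
    s < (pos : Int) → (start = -1 ∨ s < start) →
    ((pvLoop1 n pos start m l).2).getD s d = m.getD s d := by
  induction l with
  | nil => intro n pos start m s d _ _; simp [pvLoop1]
  | cons f t ih =>
    intro n pos start m s d hs hst
    by_cases hf : f = 0
    · have e0 : (f == 0) = true := by simpa using hf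
      simp only [pvLoop1, e0, if_true]
      rw [ih _ _ _ _ _ _ (by push_cast; omega) (Or.inl rfl)]
      by_cases h2 : start = -1
      · simp [h2]
      · have h3 : s < start := hst.resolve_left h2
        have e2 : (start != -1) = true := by simpa using h2
        rw [if_pos e2, PySem.Dict.getD_insert, if_neg (by omega)]
    · have hf' : (f == 0) = false := by simpa using hf
      simp only [pvLoop1, hf', Bool.false_eq_true, if_false]
      by_cases h2 : start = -1
      · have e1 : (start == -1) = true := by simpa using h2
        simp only [e1, if_true]
        rw [ih _ _ _ _ _ _ (by push_cast; omega) (Or.inr hs)]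
        have e2 : (((pos : Int)) != -1) = true := by simp only [bne_iff_ne, ne_eq]; omega
        rw [if_pos e2, PySem.Dict.getD_insert, if_neg (by omega)]
      · have h3 : s < start := hst.resolve_left h2
        have e1 : (start == -1) = false := by simpa using h2
        simp only [e1, Bool.false_eq_true, if_false]
        rw [ih _ _ _ _ _ _ (by push_cast; omega) (Or.inr h3)]
        have e2 : (start != -1) = true := by simpa using h2
        rw [if_pos e2, PySem.Dict.getD_insert, if_neg (by omega)]

-- first pass across a run: the run's start key ends up mapped to the run's length
theorem pvLoop1_run (j : Nat) : ∀ (n : Int) (pos : Nat) (s0 : Int) m rest, s0 ≠ -1 →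
    pvLoop1 n pos s0 m (List.replicate j 1 ++ 0 :: rest)
      = pvLoop1 n (pos + j + 1) (-1) (m.insert s0 ((pos : Int) + j - s0)) rest := by
  induction j with
  | zero =>
    intro n pos s0 m rest h
    have h' : (s0 != -1) = true := by simpa using h
    simp [pvLoop1, h']
  | succ j ih =>
    intro n pos s0 m rest h
    have h1 : ((1 : Int) == 0) = false := by decide
    have h2 : (s0 == -1) = false := by simpa using h
    have h' : (s0 != -1) = true := by simpa using h
    simp only [List.replicate_succ, List.cons_append, pvLoop1, h1, Bool.false_eq_true,
      if_false, h2, h']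
    rw [ih _ _ _ _ _ h]
    simp only [if_true, PySem.Dict.insert_insert_self]
    congr 2
    · omega
    · push_cast; ring

-- second pass across a run with start already set
theorem pvLoop2_run (j : Nat) : ∀ (c : Nat) (pre rest' : List (List String)) m (s : Nat) restFlags,
    pre.length = s + c →
    pvLoop2 m (s + c) (s : Int) (pre ++ List.replicate j [] ++ rest') (List.replicate j 1 ++ restFlags)
      = pvLoop2 m (s + c + j) (s : Int)
          (pre ++ (List.range' c j).map (fun i => pvFeats (i : Int) (m.getD s 0)) ++ rest') restFlags := by
  induction j with
  | zero => intro c pre rest' m s restFlags _; simp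
  | succ j ih =>
    intro c pre rest' m s restFlags hlen
    have h1 : ((1 : Int) == 0) = false := by decide
    have h2 : ((s : Int) == -1) = false := by simp
    have hget : (pre ++ ([] : List String) :: (List.replicate j [] ++ rest')).getD (s + c) [] = ([] : List String) := by
      rw [← hlen]
      simp [List.getD]
    have hset : ∀ (y : List String),
        (pre ++ ([] : List String) :: (List.replicate j [] ++ rest')).set (s + c) y
          = (pre ++ [y]) ++ (List.replicate j [] ++ rest') := by
      intro y
      rw [← hlen, List.set_append_right _ _ (Nat.le_refl pre.length)]
      simp
    simp only [List.replicate_succ, List.cons_append, List.append_assoc, pvLoop2, h1,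
      Bool.false_eq_true, if_false, h2, hget, hset]
    have hcast : ((s + c : Nat) : Int) - (s : Int) = (c : Int) := by push_cast; ring
    have := ih (c + 1) (pre ++ [pvFeats (c : Int) (m.getD (s : Int) 0)]) rest' m s restFlags
      (by simp [hlen]; omega)
    simp only [List.append_assoc, List.cons_append, List.nil_append] at this ⊢
    rw [show s + c + 1 = s + (c + 1) from by omega, hcast]
    have harr : pvFeats (c : Int) (m.getD (s : Int) 0)
        = ["p" ++ PySem.Int.toStr c, "l" ++ PySem.Int.toStr (m.getD (s : Int) 0),
           "p" ++ PySem.Int.toStr c ++ "l" ++ PySem.Int.toStr (m.getD (s : Int) 0)] := rfl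
    rw [← harr, this, show s + c + (j + 1) = s + (c + 1) + j from by omega, List.range'_succ]
    simp [List.append_assoc]

-- every Bool list splits as its leading run followed by [] or a false
theorem pvRun_split (t : List Bool) :
    t = List.replicate (pvRunLen t) true ++ t.drop (pvRunLen t)
      ∧ (t.drop (pvRunLen t) = [] ∨ ∃ u, t.drop (pvRunLen t) = false :: u) := by
  induction t with
  | nil => simp [pvRunLen]
  | cons f t ih =>
    by_cases hf : f = true
    · subst hf
      obtain ⟨h1, h2⟩ := ih
      constructor
      · simp only [pvRunLen, if_true, List.replicate_succ, List.cons_append, List.drop_succ_cons]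
        exact congrArg _ h1
      · simpa [pvRunLen] using h2
    · replace hf : f = false := by simpa using hf
      subst hf
      simp [pvRunLen]

-- main invariant: from a fresh block boundary, the two passes of A over the remaining
-- flags produce exactly B's run-scan output, appended after the prefix already built
theorem pvMain (bs : List Bool) : ∀ (n : Int) (k : Nat) (m : PySem.Dict Int Int) (pre : List (List String)),
    (∀ (s d : Int), (k : Int) ≤ s → m.getD s d = d) → pre.length = k →
    pvLoop2 ((pvLoop1 n k (-1) m (pvToInts bs ++ [0])).2) k (-1)
        (pre ++ List.replicate bs.length []) (pvToInts bs)
      = pre ++ pvEmit bs := by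
  match bs with
  | [] => intro n k m pre _ _; simp [pvToInts, pvEmit, pvLoop2]
  | false :: t =>
    intro n k m pre hm hlen
    have h0 : pvToInts (false :: t) = 0 :: pvToInts t := rfl
    simp only [h0, List.cons_append, pvLoop1, pvLoop2, beq_self_eq_true, if_true,
      List.length_cons, List.replicate_succ]
    have : pre ++ ([] : List String) :: List.replicate t.length [] = (pre ++ [[]]) ++ List.replicate t.length [] := by simp
    rw [bne_self_eq_false]
    simp only [Bool.false_eq_true, if_false, this]
    rw [pvMain t n (k + 1) m (pre ++ [[]]) (fun s d hs => hm s d (by push_cast at hs ⊢; omega))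
      (by simp [hlen])]
    simp [pvEmit]
  | true :: t =>
    intro n k m pre hm hlen
    obtain ⟨hsplit, hclose⟩ := pvRun_split t
    set L := pvRunLen t with hL
    set u := t.drop L with hu
    -- loop1: one manual step, then the run lemma
    have h1 : ((1 : Int) == 0) = false := by decide
    have hk1' : (((k : Int)) != -1) = true := by simp only [bne_iff_ne, ne_eq]; omega
    have hlist : pvToInts (true :: t) ++ [0] = 1 :: (List.replicate L 1 ++ (pvToInts u ++ [0])) := by
      conv_lhs => rw [show true :: t = true :: (List.replicate L true ++ u) from by rw [← hsplit]]
      simp [pvToInts]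
    have hz : ∃ z, pvToInts u ++ [0] = 0 :: z ∧
        (z = [] ∧ u = [] ∨ ∃ u', u = false :: u' ∧ z = pvToInts u' ++ [0]) := by
      rcases hclose with h | ⟨u', h⟩
      · exact ⟨[], by simp [h, pvToInts], Or.inl ⟨rfl, h⟩⟩
      · exact ⟨pvToInts u' ++ [0], by simp [h, pvToInts], Or.inr ⟨u', h, rfl⟩⟩
    obtain ⟨z, hzeq, hzcase⟩ := hz
    have hM : (pvLoop1 n k (-1) m (pvToInts (true :: t) ++ [0])).2
        = (pvLoop1 n (k + 1 + L + 1) (-1) (m.insert (k : Int) ((L : Int) + 1)) z).2 := by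
      rw [hlist]
      simp only [pvLoop1, h1, Bool.false_eq_true, if_false, beq_self_eq_true, if_true, hk1']
      rw [hzeq, pvLoop1_run L n (k + 1) (k : Int) _ z (by simp only [ne_eq]; omega),
        PySem.Dict.insert_insert_self,
        show (((k + 1 : Nat) : Int)) + (L : Int) - (k : Int) = (L : Int) + 1 from by push_cast; ring]
    set M := (pvLoop1 n k (-1) m (pvToInts (true :: t) ++ [0])).2 with hMdef
    have hMk : M.getD (k : Int) 0 = (L : Int) + 1 := by
      rw [hM, pvLoop1_getD_lt z n (k + 1 + L + 1) (-1) _ (k : Int) 0 (by push_cast; omega) (Or.inl rfl)]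
      simp [PySem.Dict.getD_insert]
    -- loop2: one manual step, then the run lemma
    have hfl2 : pvToInts (true :: t) = 1 :: (List.replicate L 1 ++ pvToInts u) := by
      conv_lhs => rw [show true :: t = true :: (List.replicate L true ++ u) from by rw [← hsplit]]
      simp [pvToInts]
    have hlenflags : (true :: t).length = L + 1 + u.length := by
      conv_lhs => rw [show true :: t = true :: (List.replicate L true ++ u) from by rw [← hsplit]]
      simp only [List.length_cons, List.length_append, List.length_replicate]
      omega
    have hfv : pre ++ List.replicate (true :: t).length ([] : List String)
        = pre ++ ([] : List String) :: (List.replicate L [] ++ List.replicate u.length []) := by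
      rw [hlenflags]
      simp [List.replicate_succ, ← List.replicate_append_replicate]
    have hget0 : (pre ++ ([] : List String) :: (List.replicate L [] ++ List.replicate u.length [])).getD k []
        = ([] : List String) := by
      rw [← hlen]
      simp [List.getD]
    have hset0 : ∀ (y : List String),
        (pre ++ ([] : List String) :: (List.replicate L [] ++ List.replicate u.length [])).set k y
          = (pre ++ [y]) ++ (List.replicate L [] ++ List.replicate u.length []) := by
      intro y
      rw [← hlen, List.set_append_right _ _ (Nat.le_refl pre.length)]
      simp
    rw [hfv, hfl2]
    simp only [pvLoop2, h1, Bool.false_eq_true, if_false, beq_self_eq_true, if_true, hget0, hset0]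
    have hsub : (k : Int) - (k : Int) = ((0 : Nat) : Int) := by simp
    rw [hsub, hMk]
    have hrun := pvLoop2_run L 1 (pre ++ [pvFeats ((0 : Nat) : Int) (M.getD (k : Int) 0)])
      (List.replicate u.length []) M k (pvToInts u) (by simp [hlen])
    rw [hMk] at hrun
    have hcastL : (((L + 1 : Nat)) : Int) = (L : Int) + 1 := by push_cast; ring
    have hfeatsplit : [pvFeats ((0 : Nat) : Int) ((L : Int) + 1)]
          ++ (List.range' 1 L).map (fun i => pvFeats (i : Int) ((L : Int) + 1))
        = (List.range (L + 1)).map (fun i => pvFeats (i : Int) (((L + 1 : Nat)) : Int)) := by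
      rw [hcastL, List.range_eq_range', List.range'_succ]
      simp
    have hEmit : pvEmit (true :: t)
        = (List.range (L + 1)).map (fun i => pvFeats (i : Int) (((L + 1 : Nat)) : Int)) ++ pvEmit u := by
      rw [pvEmit, if_pos rfl]
    have hstep0 : (pre ++ ([["p" ++ PySem.Int.toStr ((0 : Nat) : Int), "l" ++ PySem.Int.toStr ((L : Int) + 1),
            "p" ++ PySem.Int.toStr ((0 : Nat) : Int) ++ "l" ++ PySem.Int.toStr ((L : Int) + 1)]]
          ++ (List.replicate L [] ++ List.replicate u.length [])))
        = (pre ++ [pvFeats ((0 : Nat) : Int) ((L : Int) + 1)]) ++ (List.replicate L [] ++ List.replicate u.length []) := by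
      simp [pvFeats]
    simp only [List.append_assoc, List.nil_append] at hstep0 ⊢
    simp only [List.append_assoc] at hrun
    rw [hstep0, hrun]
    rcases hzcase with ⟨hz0, hu0⟩ | ⟨u', huu, hzz⟩
    · -- the run reaches the end of the sentence
      rw [hu0, hEmit, hu0]
      simp only [pvToInts, List.map_nil, List.length_nil, List.replicate_zero, pvLoop2,
        pvEmit, List.append_nil, ← hfeatsplit]
    · -- the run is followed by an uncapitalized word
      rw [huu]
      have hz0 : pvToInts (false :: u') = 0 :: pvToInts u' := rfl
      rw [hz0]
      simp only [List.length_cons, List.replicate_succ, pvLoop2, beq_self_eq_true, if_true]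
      have hM' : M = (pvLoop1 n (k + 1 + L + 1) (-1) (m.insert (k : Int) ((L : Int) + 1)) (pvToInts u' ++ [0])).2 := by
        rw [hM, hzz]
      have hm3 : ∀ (s d : Int), ((k + 1 + L + 1 : Nat) : Int) ≤ s →
          (m.insert (k : Int) ((L : Int) + 1)).getD s d = d := by
        intro s d hs
        rw [PySem.Dict.getD_insert, if_neg (by push_cast at hs ⊢; omega)]
        exact hm s d (by push_cast at hs ⊢; omega)
      have hpre3 : (pre ++ ([pvFeats ((0 : Nat) : Int) ((L : Int) + 1)]
            ++ ((List.range' 1 L).map (fun i => pvFeats (i : Int) ((L : Int) + 1)) ++ [[]]))).length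
          = k + 1 + L + 1 := by
        simp [hlen]; omega
      have hrec := pvMain u' n (k + 1 + L + 1) (m.insert (k : Int) ((L : Int) + 1))
        (pre ++ ([pvFeats ((0 : Nat) : Int) ((L : Int) + 1)]
          ++ ((List.range' 1 L).map (fun i => pvFeats (i : Int) ((L : Int) + 1)) ++ [[]])))
        hm3 hpre3
      rw [← hM'] at hrec
      simp only [List.append_assoc, List.cons_append, List.nil_append] at hrec ⊢
      rw [show (([] : List String) :: (List.replicate u'.length [] : List (List String)))
            = [([] : List String)] ++ List.replicate u'.length [] from rfl] at hrec ⊢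
      rw [hrec, hEmit, huu]
      have : pvEmit (false :: u') = [] :: pvEmit u' := by rw [pvEmit, if_neg (by simp)]
      rw [this, ← hfeatsplit]
      simp
  termination_by bs.length
  decreasing_by
    · simp
    · have hle : u.length ≤ t.length := by rw [hu]; simp
      have heq : u.length = u'.length + 1 := by rw [huu]; simp
      simp only [List.length_cons]
      omega

-- the empty dict maps every key to the default
theorem pvEmpty_getD (s d : Int) : (PySem.Dict.empty : PySem.Dict Int Int).getD s d = d := by
  simp [PySem.Dict.getD, PySem.Dict.get?, PySem.Dict.empty]

-- ===== VERDICT (by name: the statement is the Claim_ definition above) =====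
-- A's upperFlags are B's Bool flags written as 0/1
theorem pvFlags_eq (tokens : List String) :
    tokens.map (fun token => (PySem.List.pyGet? (hasCapOperator token) 0).getD 0)
      = pvToInts (tokens.map (fun t => PySem.Str.lower t != t)) := by
  simp only [pvToInts, List.map_map]
  refine List.map_congr_left fun t _ => ?_
  by_cases h : PySem.Str.lower t = t <;>
    simp [hasCapOperator, PySem.List.pyGet?, PySem.List.pyIdx?, h]

theorem capsPattern_spec : Claim_equal_capsPattern := by
  intro sen fields _ _
  show capsPattern sen fields = capsPattern_alt sen fields
  simp only [capsPattern, capsPattern_alt]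
  generalize htok : sen.map (fun word => (PySem.List.pyGet? word ((PySem.List.pyGet? fields 0).getD 0)).getD "") = tokens
  have hfv : sen.map (fun _ => ([] : List String))
      = List.replicate (pvToInts (tokens.map (fun t => PySem.Str.lower t != t))).length ([] : List String) := by
    have : (pvToInts (tokens.map (fun t => PySem.Str.lower t != t))).length = sen.length := by
      simp [pvToInts, ← htok]
    rw [this, List.map_const']
  rw [pvFlags_eq, hfv, pvLoop1_fst]
  simpa [pvToInts] using pvMain (tokens.map (fun t => PySem.Str.lower t != t))
    ((pvToInts (tokens.map (fun t => PySem.Str.lower t != t))).length : Int) 0 PySem.Dict.empty []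
    (fun s d _ => pvEmpty_getD s d) rfl
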